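-- pv_equiv track=rewrite | github.com/pranav-ghoghari/dsa_python | python_baseline/build_status_summary.py | build_status_summary
-- ===== SOURCE A (Python) =====
-- def build_status_summary(jobs: list[dict]) -> str:
--     count_jobs = {}
--     for job in jobs:
--         if "status" in job:
--             status = job["status"]
--             count_jobs[status] = count_jobs.get(status,0)+1
--     combined_jobs = ""
--     if count_jobs:
--         combined_jobs = "\n".join(f"{k}: {v}" for k,v in sorted(count_jobs.items()))
--     else:
--         combined_jobs = "No jobs found."
--
--     return combined_jobs
-- ===== SOURCE B (Python) =====
-- def build_status_summary(jobs: list[dict]) -> str: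
--     statuses = sorted(job["status"] for job in jobs if "status" in job)
--     if not statuses:
--         return "No jobs found."
--     return "\n".join(_runs(statuses))
--
--
-- def _runs(statuses):
--     # statuses is sorted, so equal values form contiguous runs
--     if not statuses:
--         return []
--     s = statuses[0]
--     rest = statuses[1:]
--     k = 0
--     while k < len(rest) and rest[k] == s:
--         k += 1
--     return [f"{s}: {1 + k}"] + _runs(rest[k:])
-- ===== Notes on version B (the rewrite author's own statement) =====
-- stated objective: alternative
-- what changed: B keeps no count dictionary: it sorts the extracted status values once and emits one line per run of equal adjacent values (sort-then-group) instead of building a counter dict and sorting its items.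
import Mathlib
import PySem

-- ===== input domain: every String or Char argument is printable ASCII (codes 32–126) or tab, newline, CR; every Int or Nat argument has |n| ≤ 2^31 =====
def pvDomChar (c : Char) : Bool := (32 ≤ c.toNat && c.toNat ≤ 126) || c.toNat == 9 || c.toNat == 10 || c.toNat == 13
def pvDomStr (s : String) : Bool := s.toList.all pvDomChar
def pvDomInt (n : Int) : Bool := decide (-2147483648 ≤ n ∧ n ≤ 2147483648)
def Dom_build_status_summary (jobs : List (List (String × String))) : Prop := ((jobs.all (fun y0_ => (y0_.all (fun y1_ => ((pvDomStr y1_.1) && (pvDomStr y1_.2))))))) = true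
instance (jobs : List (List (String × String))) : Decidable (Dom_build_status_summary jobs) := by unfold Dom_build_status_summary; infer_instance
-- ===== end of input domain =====

-- B replaces A's counting dictionary by sort-then-group over the status values (alternative decomposition, same cost).

-- ===== PORT A =====
def build_status_summary (jobs : List (List (String × String))) : String :=
  let count_jobs := jobs.foldl (fun d job =>
      match (PySem.Dict.mk job).get? "status" with
      | some status => d.insert status (d.getD status 0 + 1)
      | none => d) (PySem.Dict.empty : PySem.Dict String Int)
  if count_jobs.items ≠ [] then
    PySem.Str.join "\n" ((PySem.List.sorted2 count_jobs.items (fun kv => kv.1) (fun kv => kv.2)).map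
      (fun kv => kv.1 ++ ": " ++ PySem.Int.toStr kv.2))
  else "No jobs found."

-- ===== PORT B =====
-- helper _runs of Source B: one line per run of equal adjacent values of the (sorted) list
def pvRunsB : List String → List String
  | [] => []
  | s :: rest =>
    let k := (rest.takeWhile (fun x => x == s)).length
    (s ++ ": " ++ PySem.Int.toStr (1 + (k : Int))) :: pvRunsB (rest.drop k)
termination_by xs => xs.length
decreasing_by
  simp only [List.length_drop, List.length_cons]
  omega

def build_status_summary_alt (jobs : List (List (String × String))) : String :=
  let statuses := PySem.List.sorted (jobs.filterMap (fun job => (PySem.Dict.mk job).get? "status")) (fun x => x)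
  if statuses = [] then "No jobs found."
  else PySem.Str.join "\n" (pvRunsB statuses)

-- ===== PRECONDITION & SPEC =====
def Spec_build_status_summary (jobs : List (List (String × String))) (out : String) : Prop := out = build_status_summary_alt jobs
instance (jobs : List (List (String × String))) (out : String) : Decidable (Spec_build_status_summary jobs out) := by unfold Spec_build_status_summary; infer_instance

-- ===== CLAIM (what is proved, stated in full; the proofs are below) =====
def Claim_equal_build_status_summary : Prop := ∀ (jobs : List (List (String × String))), Dom_build_status_summary jobs → Spec_build_status_summary jobs (build_status_summary jobs)

-- ===== LEMMAS AND PROOFS =====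

-- A's fold over jobs is the Counter of the extracted status values
theorem pv_fold_counter (jobs : List (List (String × String))) :
    (jobs.foldl (fun d job =>
      match (PySem.Dict.mk job).get? "status" with
      | some status => d.insert status (d.getD status 0 + 1)
      | none => d) (PySem.Dict.empty : PySem.Dict String Int))
    = PySem.Dict.counter (jobs.filterMap (fun job => (PySem.Dict.mk job).get? "status")) := by
  rw [← PySem.Dict.foldl_insert_getD_add_one_eq_counter, List.foldl_filterMap]
  congr 1
  funext d job
  cases (PySem.Dict.mk job).get? "status" <;> rfl

theorem pv_insertBy_congr {α : Type} (b b' : α → α → Bool) (x : α) (acc : List α)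
    (h : ∀ y ∈ acc, b x y = b' x y) : PySem.List.insertBy b x acc = PySem.List.insertBy b' x acc := by
  induction acc with
  | nil => rfl
  | cons y ys ih =>
    simp only [PySem.List.insertBy, h y (by simp)]
    split
    · rfl
    · simp only [List.cons.injEq, true_and]
      exact ih (fun z hz => h z (by simp [hz]))

theorem pv_foldl_insertBy_congr {α : Type} (b b' : α → α → Bool) (S : List α)
    (h : ∀ x ∈ S, ∀ y ∈ S, b x y = b' x y) :
    ∀ (xs acc : List α), (∀ y ∈ xs, y ∈ S) → (∀ y ∈ acc, y ∈ S) →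
    xs.foldl (fun a x => PySem.List.insertBy b x a) acc = xs.foldl (fun a x => PySem.List.insertBy b' x a) acc := by
  intro xs
  induction xs with
  | nil => intro acc _ _; rfl
  | cons x xs ih =>
    intro acc hxs hacc
    have hx : x ∈ S := hxs x (by simp)
    simp only [List.foldl_cons]
    rw [pv_insertBy_congr b b' x acc (fun y hy => h x hx y (hacc y hy))]
    exact ih _ (fun y hy => hxs y (by simp [hy]))
      (fun y hy => by
        rcases (PySem.List.mem_insertBy (before := b') (x := x) (ys := acc) (y := y)).1 hy with h1 | h1
        · exact h1 ▸ hx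
        · exact hacc y h1)

-- Python's tuple sort on pairs with pairwise-distinct first components is the sort by first component
theorem pv_sorted2_eq_sorted_fst (xs : List (String × Int))
    (h : ∀ a ∈ xs, ∀ b ∈ xs, a.1 = b.1 → a = b) :
    PySem.List.sorted2 xs (fun kv => kv.1) (fun kv => kv.2) = PySem.List.sorted xs (fun kv => kv.1) := by
  unfold PySem.List.sorted2 PySem.List.sorted
  simp only [if_neg (by decide : ¬ (false = true))]
  apply pv_foldl_insertBy_congr _ _ xs _ xs [] (fun y hy => hy) (by simp)
  intro a ha c hc
  by_cases hac : a.1 = c.1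
  · have : a = c := h a ha c hc hac
    subst this
    simp
  · rcases lt_or_gt_of_ne hac with hlt | hgt
    · simp [hlt, not_lt_of_gt hlt]
    · simp [hgt, not_lt_of_gt hgt]

theorem pv_drop_takeWhile (p : String → Bool) (l : List String) :
    l.drop (l.takeWhile p).length = l.dropWhile p := by
  induction l with
  | nil => rfl
  | cons x xs ih =>
    by_cases h : p x
    · simp [h, ih]
    · simp [h]

theorem pv_not_mem_dropWhile (s : String) (rest : List String)
    (hs_le : ∀ x ∈ rest, s ≤ x) (hrest : rest.Pairwise (· ≤ ·)) :
    s ∉ rest.dropWhile (fun x => x == s) := by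
  intro hmem
  cases hD : rest.dropWhile (fun x => x == s) with
  | nil => rw [hD] at hmem; exact absurd hmem (List.not_mem_nil)
  | cons h t =>
    rw [hD] at hmem
    have hw : rest.dropWhile (fun x => x == s) ≠ [] := by rw [hD]; simp
    have hne := List.head_dropWhile_not (fun x => x == s) hw
    simp only [hD, List.head_cons] at hne
    have hhs : h ≠ s := by simpa using hne
    have hDsub : (h :: t).Sublist rest := hD ▸ List.dropWhile_sublist _
    have hsh : s ≤ h := hs_le h (hDsub.mem (by simp))
    have hpw : (h :: t).Pairwise (· ≤ ·) := hrest.sublist hDsub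
    rcases List.mem_cons.1 hmem with hm | hm
    · exact hhs hm.symm
    · exact hhs (le_antisymm (List.rel_of_pairwise_cons hpw hm) hsh)

-- the run-grouping of a sorted list is one line per distinct value, in increasing order, with its count
theorem pvRunsB_sorted : ∀ (T : List String), T.Pairwise (· ≤ ·) →
    pvRunsB T = (PySem.List.sorted (PySem.Set.ofList T) (fun x => x)).map
      (fun k => k ++ ": " ++ PySem.Int.toStr ((T.count k : Int))) := by
  intro T
  induction T using pvRunsB.induct with
  | case1 => intro _; simp [pvRunsB, PySem.List.sorted]
  | case2 s rest k ih =>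
    intro hT
    have hs_le : ∀ x ∈ rest, s ≤ x := fun x hx => List.rel_of_pairwise_cons hT hx
    have hrest : rest.Pairwise (· ≤ ·) := hT.of_cons
    have hdrop : rest.drop k = rest.dropWhile (fun x => x == s) := pv_drop_takeWhile _ rest
    have hsame : ∀ x ∈ rest.takeWhile (fun x => x == s), x = s :=
      fun x hx => eq_of_beq (List.mem_takeWhile_imp (p := fun x => x == s) hx)
    have hsplit : rest = rest.takeWhile (fun x => x == s) ++ rest.dropWhile (fun x => x == s) :=
      (List.takeWhile_append_dropWhile).symm
    have hDsub : (rest.dropWhile (fun x => x == s)).Sublist rest := List.dropWhile_sublist _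
    have hD_pairwise : (rest.dropWhile (fun x => x == s)).Pairwise (· ≤ ·) := hrest.sublist hDsub
    have hsD : s ∉ rest.dropWhile (fun x => x == s) := pv_not_mem_dropWhile s rest hs_le hrest
    have hcount_s : (((s :: rest).count s : Int)) = 1 + (k : Int) := by
      have h1 : (rest.takeWhile (fun x => x == s)).count s = k :=
        List.count_eq_length.2 (fun b hb => (hsame b hb).symm)
      have h2 : (rest.dropWhile (fun x => x == s)).count s = 0 := List.count_eq_zero.2 hsD
      rw [List.count_cons_self]
      conv_lhs => rw [hsplit]
      rw [List.count_append, h1, h2]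
      push_cast
      omega
    have hnodupD : (PySem.List.sorted (PySem.Set.ofList (rest.dropWhile (fun x => x == s))) (fun x => x)).Nodup :=
      ((PySem.List.sorted_perm _ _ _).nodup_iff).2 (PySem.Set.nodup_ofList _)
    have hmemD : ∀ x, (x ∈ PySem.List.sorted (PySem.Set.ofList (rest.dropWhile (fun x => x == s))) (fun x => x)) ↔
        x ∈ rest.dropWhile (fun x => x == s) := by
      intro x
      rw [PySem.List.mem_sorted, PySem.Set.mem_ofList]
    have hsorted : (PySem.List.sorted (PySem.Set.ofList (s :: rest)) (fun x => x)) =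
        s :: PySem.List.sorted (PySem.Set.ofList (rest.dropWhile (fun x => x == s))) (fun x => x) := by
      apply PySem.List.sorted_eq_of_perm_of_pairwise_lt
      · rw [List.perm_ext_iff_of_nodup
          (List.nodup_cons.2 ⟨fun h => hsD ((hmemD s).1 h), hnodupD⟩)
          (PySem.Set.nodup_ofList _)]
        intro x
        rw [PySem.Set.mem_ofList]
        simp only [List.mem_cons, hmemD]
        constructor
        · rintro (rfl | hx)
          · exact .inl rfl
          · exact .inr (hsplit ▸ List.mem_append_right _ hx)
        · rintro (rfl | hx)
          · exact .inl rfl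
          · rw [hsplit] at hx
            rcases List.mem_append.1 hx with hx | hx
            · exact .inl (hsame x hx)
            · exact .inr hx
      · refine List.pairwise_cons.2 ⟨?_, ?_⟩
        · intro y hy
          have hyD : y ∈ rest.dropWhile (fun x => x == s) := (hmemD y).1 hy
          exact lt_of_le_of_ne (hs_le y (hDsub.mem hyD)) (fun h => hsD (h ▸ hyD))
        · exact PySem.List.sorted_ofList_pairwise_lt _
    have hcount_tail : ∀ x ∈ rest.dropWhile (fun x => x == s),
        (((s :: rest).count x : Int)) = (((rest.dropWhile (fun x => x == s)).count x : Int)) := by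
      intro x hx
      have hxs : x ≠ s := fun h => hsD (h ▸ hx)
      have h0 : (rest.takeWhile (fun x => x == s)).count x = 0 :=
        List.count_eq_zero.2 (fun h => hxs (hsame x h))
      rw [List.count_cons_of_ne (Ne.symm hxs)]
      conv_lhs => rw [hsplit]
      rw [List.count_append, h0, Nat.zero_add]
    have ih' := ih (hdrop ▸ hD_pairwise)
    rw [hdrop] at ih'
    rw [pvRunsB, hdrop, hsorted, List.map_cons, ih']
    congr 1
    · rw [← hcount_s]
    · exact (List.map_congr_left (fun x hx => by rw [hcount_tail x ((hmemD x).1 hx)])).symm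

-- ===== VERDICT (by name: the statement is the Claim_ definition above) =====
theorem build_status_summary_spec : Claim_equal_build_status_summary := by
  intro jobs _
  unfold Spec_build_status_summary
  simp only [build_status_summary, build_status_summary_alt]
  rw [pv_fold_counter, PySem.Dict.items_counter]
  set S := jobs.filterMap (fun job => (PySem.Dict.mk job).get? "status") with hS
  by_cases h0 : S = []
  · rw [h0]
    simp [PySem.Set.ofList, PySem.List.sorted]
  · obtain ⟨x, xs, hxx⟩ := List.exists_cons_of_ne_nil h0
    have hxmem : x ∈ PySem.Set.ofList S := (PySem.Set.mem_ofList S x).2 (by rw [hxx]; simp)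
    have hA : (PySem.Set.ofList S).map (fun k => (k, ((S.count k : Int)))) ≠ [] :=
      List.ne_nil_of_mem (List.mem_map_of_mem hxmem)
    have hB : ¬ (PySem.List.sorted S (fun x => x) = []) := by
      rw [PySem.List.sorted_eq_nil_iff]; exact h0
    rw [if_pos hA, if_neg hB]
    have hinj : ∀ a ∈ (PySem.Set.ofList S).map (fun k => (k, ((S.count k : Int)))),
        ∀ b ∈ (PySem.Set.ofList S).map (fun k => (k, ((S.count k : Int)))), a.1 = b.1 → a = b := by
      rintro a ha b hb h1
      obtain ⟨k1, _, rfl⟩ := List.mem_map.1 ha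
      obtain ⟨k2, _, rfl⟩ := List.mem_map.1 hb
      simp only at h1
      rw [h1]
    rw [pv_sorted2_eq_sorted_fst _ hinj]
    have hsorted_items : PySem.List.sorted ((PySem.Set.ofList S).map (fun k => (k, ((S.count k : Int))))) (fun kv => kv.1)
        = (PySem.List.sorted (PySem.Set.ofList S) (fun x => x)).map (fun k => (k, ((S.count k : Int)))) := by
      apply PySem.List.sorted_eq_of_perm_of_pairwise_lt
      · exact (PySem.List.sorted_perm _ _ _).map _
      · rw [List.pairwise_map]
        exact PySem.List.sorted_ofList_pairwise_lt S
    rw [hsorted_items, List.map_map]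
    rw [pvRunsB_sorted _ (PySem.List.sorted_pairwise S (fun x => x))]
    have hperm : (PySem.Set.ofList (PySem.List.sorted S (fun x => x))).Perm (PySem.Set.ofList S) := by
      rw [List.perm_ext_iff_of_nodup (PySem.Set.nodup_ofList _) (PySem.Set.nodup_ofList _)]
      intro a
      rw [PySem.Set.mem_ofList, PySem.Set.mem_ofList, PySem.List.mem_sorted]
    rw [PySem.List.sorted_eq_sorted_of_perm _ _ _ (fun a b h => h) hperm]
    refine congrArg _ (List.map_congr_left ?_)
    intro y _
    simp only [Function.comp_apply]
    rw [(PySem.List.sorted_perm S (fun x => x) false).count_eq]
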